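-- pv_equiv track=rewrite | github.com/jonatasosilva/impacta-tecnicas-de-programacao | ac_3/virus.py | calcula_letalidade
-- ===== SOURCE A (Python) =====
-- def calcula_letalidade(idades):
--     letalidade = 0
--     while len(idades) > 1:
--         soma_par = idades[0] - idades[-1]
--         letalidade += soma_par
--         idades.pop(0)
--         idades.pop()
--
--     return letalidade
-- ===== SOURCE B (Python) =====
-- def calcula_letalidade(idades):
--     metade = idades[:len(idades) // 2]
--     return sum(x - y for x, y in zip(metade, reversed(idades)))
-- ===== Notes on version B (the rewrite author's own statement) =====
-- stated objective: faster
-- what changed: Replaces the destructive O(n^2) loop (pop(0) each round) by a single O(n) pass pairing the first half with the reversed list and summing the differences; B does not mutate the argument.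
import Mathlib
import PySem

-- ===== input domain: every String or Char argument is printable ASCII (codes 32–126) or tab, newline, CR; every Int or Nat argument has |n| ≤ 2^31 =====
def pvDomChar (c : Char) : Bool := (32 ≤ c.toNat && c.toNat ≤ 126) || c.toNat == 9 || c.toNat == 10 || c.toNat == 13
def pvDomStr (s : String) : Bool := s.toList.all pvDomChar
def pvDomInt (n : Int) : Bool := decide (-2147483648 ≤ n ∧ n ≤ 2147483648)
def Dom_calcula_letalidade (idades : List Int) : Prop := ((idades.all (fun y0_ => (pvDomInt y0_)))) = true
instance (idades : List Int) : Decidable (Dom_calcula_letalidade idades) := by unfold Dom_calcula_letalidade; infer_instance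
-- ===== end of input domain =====

-- B changes: single O(n) pass pairing the first half with the reversed list instead of
-- A's loop that pops both ends (objective: faster). A MUTATES its argument (pops it empty
-- down to <=1 elements); only the RETURN value is claimed, and B does not mutate.

-- ===== PORT A =====
-- A's while-loop: pop front (drop 1) and back (dropLast), accumulating idades[0]-idades[-1]
def pvAGo : List Int → Int → Int
  | xs, acc =>
    if 1 < xs.length then
      pvAGo (xs.drop 1).dropLast (acc + (xs.headD 0 - xs.getLastD 0))
    else acc
termination_by xs => xs.length
decreasing_by simp; omega

def calcula_letalidade (idades : List Int) : Int := pvAGo idades 0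

-- ===== PORT B =====
-- Source B: zip of the first half with reversed(idades), summing x - y
def calcula_letalidade_alt (idades : List Int) : Int :=
  (List.zipWith (· - ·) (idades.take (idades.length / 2)) idades.reverse).sum

-- ===== PRECONDITION & SPEC =====
def Spec_calcula_letalidade (idades : List Int) (out : Int) : Prop := out = calcula_letalidade_alt idades
instance (idades : List Int) (out : Int) : Decidable (Spec_calcula_letalidade idades out) := by unfold Spec_calcula_letalidade; infer_instance

-- ===== CLAIM (what is proved, stated in full; the proofs are below) =====
def Claim_equal_calcula_letalidade : Prop := ∀ (idades : List Int), Dom_calcula_letalidade idades → Spec_calcula_letalidade idades (calcula_letalidade idades)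

-- ===== LEMMAS AND PROOFS =====

theorem pv_zipWith_append_right (f : Int → Int → Int) :
    ∀ (l1 l2 l3 : List Int), l1.length ≤ l2.length →
      List.zipWith f l1 (l2 ++ l3) = List.zipWith f l1 l2 := by
  intro l1
  induction l1 with
  | nil => intro l2 l3 _; simp
  | cons a t ih =>
    intro l2 l3 h
    cases l2 with
    | nil => simp at h
    | cons b t2 =>
      simp only [List.cons_append, List.zipWith_cons_cons]
      rw [ih t2 l3 (by simpa using h)]

theorem pv_alt_step (a b : Int) (ys : List Int) :
    calcula_letalidade_alt (a :: (ys ++ [b])) = (a - b) + calcula_letalidade_alt ys := by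
  unfold calcula_letalidade_alt
  have hlen : (a :: (ys ++ [b])).length = ys.length + 2 := by simp
  have hdiv : (a :: (ys ++ [b])).length / 2 = ys.length / 2 + 1 := by rw [hlen]; omega
  rw [hdiv]
  have htake : (a :: (ys ++ [b])).take (ys.length / 2 + 1)
      = a :: ys.take (ys.length / 2) := by
    simp only [List.take_succ_cons]
    rw [List.take_append_of_le_length (by omega)]
  have hrev : (a :: (ys ++ [b])).reverse = b :: (ys.reverse ++ [a]) := by simp
  rw [htake, hrev]
  simp only [List.zipWith_cons_cons, List.sum_cons]
  rw [pv_zipWith_append_right _ _ _ _ (by simp)]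

theorem pv_go_eq : ∀ (n : Nat) (xs : List Int) (acc : Int), xs.length = n →
    pvAGo xs acc = acc + calcula_letalidade_alt xs := by
  intro n
  induction n using Nat.strong_induction_on with
  | _ n ih =>
    intro xs acc hlen
    rw [pvAGo]
    by_cases h : 1 < xs.length
    · simp only [h, if_true]
      obtain ⟨a, t, rfl⟩ : ∃ a t, xs = a :: t := by
        cases xs with
        | nil => simp at h
        | cons a t => exact ⟨a, t, rfl⟩
      obtain ⟨ys, b, rfl⟩ : ∃ ys b, t = ys ++ [b] := by
        rcases t.eq_nil_or_concat with rfl | ⟨ys, b, hc⟩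
        · simp at h
        · exact ⟨ys, b, by simp [hc]⟩
      have hd : ((a :: (ys ++ [b])).drop 1).dropLast = ys := by simp
      rw [hd]
      have hlt : ys.length < n := by simp at hlen; omega
      rw [ih ys.length hlt ys _ rfl, pv_alt_step]
      have hh : (a :: (ys ++ [b])).headD 0 = a := rfl
      have hl : (a :: (ys ++ [b])).getLastD 0 = b := by
        have : (a :: (ys ++ [b])) = (a :: ys) ++ [b] := by simp
        rw [this, List.getLastD_eq_getLast?, List.getLast?_concat]
        rfl
      rw [hh, hl]; ring
    · simp only [h, if_false]
      have : calcula_letalidade_alt xs = 0 := by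
        unfold calcula_letalidade_alt
        have : xs.length / 2 = 0 := by omega
        simp [this]
      rw [this]; ring

-- ===== VERDICT (by name: the statement is the Claim_ definition above) =====
theorem calcula_letalidade_spec : Claim_equal_calcula_letalidade := by
  intro idades _
  unfold Spec_calcula_letalidade calcula_letalidade
  rw [pv_go_eq idades.length idades 0 rfl]
  ring
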